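-- pv_equiv track=rewrite | github.com/surPoudel/got_fast | 04_combine_chunks.py | sub_levenshtein_distance
-- ===== SOURCE A (Python) =====
-- def sub_levenshtein_distance(pattern: str, text: str, cutoff: int) -> int:
--     """
--     Minimum Levenshtein distance between pattern and ANY substring of text (unanchored),
--     with early cutoff. This matches R's agrep() "approximate grep" behavior for literal strings.
--
--     Returns cutoff+1 when it exceeds cutoff.
--     """
--     if cutoff < 0:
--         return cutoff + 1
--     if pattern == "":
--         return 0
--
--     # If text is much shorter, you need at least deletions
--     if len(pattern) - len(text) > cutoff:
--         return cutoff + 1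
--
--     n = len(text)
--
--     # Unanchored: allow starting anywhere at 0 cost (distance to empty pattern is 0 at any position)
--     prev = [0] * (n + 1)
--
--     for i, pc in enumerate(pattern, start=1):
--         cur = [i]
--         min_row = cur[0]
--         for j, tc in enumerate(text, start=1):
--             ins = cur[j - 1] + 1
--             dele = prev[j] + 1
--             sub = prev[j - 1] + (pc != tc)
--
--             v = ins if ins < dele else dele
--             if sub < v:
--                 v = sub
--             cur.append(v)
--             if v < min_row:
--                 min_row = v
--
--         if min_row > cutoff:
--             return cutoff + 1
--         prev = cur
--
--     best = min(prev)  # can end anywhere => unanchored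
--     return best if best <= cutoff else cutoff + 1
-- ===== SOURCE B (Python) =====
-- def sub_levenshtein_distance(pattern: str, text: str, cutoff: int) -> int:
--     """Same result as A, computed text-major (Sellers' column DP) with no early exit:
--     one column of the unanchored edit-distance matrix per text character."""
--     if cutoff < 0:
--         return cutoff + 1
--     if pattern == "":
--         return 0
--     m = len(pattern)
--     col = list(range(m + 1))
--     best = m
--     for tc in text:
--         new = [0]
--         for i, pc in enumerate(pattern, start=1):
--             new.append(min(new[i - 1] + 1, col[i] + 1, col[i - 1] + (pc != tc)))
--         col = new
--         if new[-1] < best: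
--             best = new[-1]
--     return best if best <= cutoff else cutoff + 1
-- ===== Notes on version B (the rewrite author's own statement) =====
-- stated objective: alternative
-- what changed: Replaces A's pattern-major row DP with per-row minimum tracking and three early returns by Sellers' text-major column DP: one column per text character, tracking only the running minimum of the last row; the length guard and the per-row cutoff exit disappear (capping once at the end provably gives the same value).
import Mathlib
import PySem

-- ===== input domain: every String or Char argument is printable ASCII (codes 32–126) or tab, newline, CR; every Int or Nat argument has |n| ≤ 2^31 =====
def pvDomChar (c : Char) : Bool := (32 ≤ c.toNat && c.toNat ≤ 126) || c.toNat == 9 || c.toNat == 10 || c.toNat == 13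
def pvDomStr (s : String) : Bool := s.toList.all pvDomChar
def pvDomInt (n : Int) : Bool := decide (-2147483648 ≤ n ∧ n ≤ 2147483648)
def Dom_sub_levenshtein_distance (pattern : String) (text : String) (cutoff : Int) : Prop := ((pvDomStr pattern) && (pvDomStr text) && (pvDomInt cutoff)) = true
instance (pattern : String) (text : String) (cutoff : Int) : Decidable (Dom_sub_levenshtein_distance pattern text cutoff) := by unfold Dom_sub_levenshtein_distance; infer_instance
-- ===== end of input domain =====

-- B recomputes A's unanchored edit distance text-major (Sellers' column DP, one column per
-- text character, no early exit); equal return value proved on every input.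

-- ===== PORT A =====
-- A's inner loop: the indexed reads prev[j-1], prev[j] become the two leading elements of the
-- structurally-walked remainder of prev; returns (cur without its head, min_row).
def aInner (pc : Char) (curLast minRow : Int) (prev : List Int) (ts : List Char) : List Int × Int :=
  match prev, ts with
  | pj1 :: pj :: prest, tc :: trest =>
      let ins := curLast + 1
      let dele := pj + 1
      let sub := pj1 + (if pc ≠ tc then 1 else 0)
      let v0 := if ins < dele then ins else dele
      let v := if sub < v0 then sub else v0
      let res := aInner pc v (if v < minRow then v else minRow) (pj :: prest) trest
      (v :: res.1, res.2)
  | _, _ => ([], minRow)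
def aRows (t : List Char) (cutoff : Int) (prev : List Int) (i : Int) (ps : List Char) : Int :=
  match ps with
  | [] =>
      match PySem.List.min? prev (fun x => x) with
      | some best => if best ≤ cutoff then best else cutoff + 1
      | none => 0
  | pc :: rest =>
      let res := aInner pc i i prev t
      if res.2 > cutoff then cutoff + 1
      else aRows t cutoff (i :: res.1) (i + 1) rest
def sub_levenshtein_distance (pattern : String) (text : String) (cutoff : Int) : Int :=
  if cutoff < 0 then cutoff + 1
  else if pattern = "" then 0
  else if (pattern.toList.length : Int) - (text.toList.length : Int) > cutoff then cutoff + 1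
  else
    let n := text.toList.length
    aRows text.toList cutoff (List.replicate (n + 1) (0 : Int)) 1 pattern.toList

-- ===== PORT B =====
-- B's inner loop: builds the new column below its 0 head, walking the old column
-- (col[i-1] = diag, col[i] = up) in step with the pattern; left is new[i-1].
def bStep (tc : Char) (left : Int) (col : List Int) (ps : List Char) : List Int :=
  match col, ps with
  | diag :: up :: rest, pc :: ps' =>
      let v := min (min (left + 1) (up + 1)) (diag + (if pc ≠ tc then 1 else 0))
      v :: bStep tc v (up :: rest) ps'
  | _, _ => []
def bLoop (p : List Char) (col : List Int) (best : Int) (ts : List Char) : Int :=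
  match ts with
  | [] => best
  | tc :: trest =>
      let newcol := (0 : Int) :: bStep tc 0 col p
      let last := newcol.getLastD 0
      bLoop p newcol (if last < best then last else best) trest
def sub_levenshtein_distance_alt (pattern : String) (text : String) (cutoff : Int) : Int :=
  if cutoff < 0 then cutoff + 1
  else if pattern = "" then 0
  else
    let p := pattern.toList
    let m := p.length
    let col := (List.range (m + 1)).map (fun i => (i : Int))
    let best := bLoop p col (m : Int) text.toList
    if best ≤ cutoff then best else cutoff + 1


-- ===== PRECONDITION & SPEC =====
def Spec_sub_levenshtein_distance (pattern : String) (text : String) (cutoff : Int) (out : Int) : Prop := out = sub_levenshtein_distance_alt pattern text cutoff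
instance (pattern : String) (text : String) (cutoff : Int) (out : Int) : Decidable (Spec_sub_levenshtein_distance pattern text cutoff out) := by unfold Spec_sub_levenshtein_distance; infer_instance

-- ===== CLAIM (what is proved, stated in full; the proofs are below) =====
def Claim_equal_sub_levenshtein_distance : Prop := ∀ (pattern : String) (text : String) (cutoff : Int), Dom_sub_levenshtein_distance pattern text cutoff → Spec_sub_levenshtein_distance pattern text cutoff (sub_levenshtein_distance pattern text cutoff)

-- ===== LEMMAS AND PROOFS =====
-- Dm is the unanchored edit-distance matrix both programs tabulate (row r = pattern prefix,
-- column j = text prefix); rowSeg/colSeg are its row/column segments, rmin a row's minimum.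
def dcost (p t : List Char) (i j : Nat) : Int := if p.getD i ' ' = t.getD j ' ' then 0 else 1
def Dm (p t : List Char) : Nat → Nat → Int
  | 0, _ => 0
  | i + 1, 0 => (i : Int) + 1
  | i + 1, j + 1 =>
      min (min (Dm p t (i + 1) j + 1) (Dm p t i (j + 1) + 1)) (Dm p t i j + dcost p t i j)
def rowSeg (p t : List Char) (r j cnt : Nat) : List Int :=
  match cnt with
  | 0 => []
  | c + 1 => Dm p t r j :: rowSeg p t r (j + 1) c
def colSeg (p t : List Char) (j i cnt : Nat) : List Int :=
  match cnt with
  | 0 => []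
  | c + 1 => Dm p t i j :: colSeg p t j (i + 1) c
def rminAux (p t : List Char) (r : Nat) (acc : Int) (j cnt : Nat) : Int :=
  match cnt with
  | 0 => acc
  | c + 1 => rminAux p t r (min acc (Dm p t r j)) (j + 1) c
def rmin (p t : List Char) (r : Nat) : Int := rminAux p t r (Dm p t r 0) 1 t.length
theorem if_lt_eq_min (a b : Int) : (if a < b then a else b) = min a b := by
  rw [min_def]; split_ifs <;> omega
theorem if_lt_eq_min' (a b : Int) : (if a < b then a else b) = min b a := by
  rw [min_def]; split_ifs <;> omega
theorem dcost_nonneg (p t : List Char) (i j : Nat) : 0 ≤ dcost p t i j := by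
  unfold dcost; split <;> omega
theorem Dm_row_zero (p t : List Char) (r : Nat) : Dm p t r 0 = (r : Int) := by
  cases r <;> simp [Dm]
theorem Dm_ge (p t : List Char) (i j : Nat) : (i : Int) - (j : Int) ≤ Dm p t i j := by
  induction i, j using Dm.induct with
  | case1 j => simp [Dm]
  | case2 i => simp [Dm]
  | case3 i j ih1 ih2 ih3 =>
      have h := dcost_nonneg p t i j
      simp only [Dm]
      push_cast
      omega
theorem getD_of_drop {α : Type} (l : List α) (j : Nat) (d x : α) (r : List α)
    (h : l.drop j = x :: r) : l.getD j d = x := by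
  have h0 : (l.drop j)[0]? = some x := by rw [h]; rfl
  rw [List.getElem?_drop, Nat.add_zero] at h0
  simp [List.getD_eq_getElem?_getD, h0]
theorem drop_succ_of_drop {α : Type} (l : List α) (j : Nat) (x : α) (r : List α)
    (h : l.drop j = x :: r) : l.drop (j + 1) = r := by
  have h2 : (l.drop j).drop 1 = r := by rw [h]; rfl
  rw [List.drop_drop] at h2
  exact h2
theorem rowSeg_foldl_min (p t : List Char) (r : Nat) :
    ∀ (cnt j : Nat) (acc : Int), (rowSeg p t r j cnt).foldl min acc = rminAux p t r acc j cnt := by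
  intro cnt
  induction cnt with
  | zero => intro j acc; rfl
  | succ c ih => intro j acc; simp [rowSeg, rminAux, ih]
theorem rminAux_le_acc (p t : List Char) (r : Nat) :
    ∀ (cnt j : Nat) (acc : Int), rminAux p t r acc j cnt ≤ acc := by
  intro cnt
  induction cnt with
  | zero => intro j acc; exact le_refl _
  | succ c ih =>
      intro j acc
      calc rminAux p t r (min acc (Dm p t r j)) (j + 1) c ≤ min acc (Dm p t r j) := ih _ _
        _ ≤ acc := min_le_left _ _
theorem rminAux_le_elem (p t : List Char) (r : Nat) :
    ∀ (cnt j : Nat) (acc : Int) (k : Nat), j ≤ k → k < j + cnt →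
    rminAux p t r acc j cnt ≤ Dm p t r k := by
  intro cnt
  induction cnt with
  | zero => intro j acc k h1 h2; omega
  | succ c ih =>
      intro j acc k h1 h2
      rcases Nat.eq_or_lt_of_le h1 with heq | hlt
      · subst heq
        calc rminAux p t r (min acc (Dm p t r j)) (j + 1) c ≤ min acc (Dm p t r j) :=
              rminAux_le_acc p t r c _ _
          _ ≤ Dm p t r j := min_le_right _ _
      · exact ih (j + 1) _ k hlt (by omega)
theorem rminAux_lb (p t : List Char) (r : Nat) (b : Int) :
    ∀ (cnt j : Nat) (acc : Int), (∀ k, j ≤ k → k < j + cnt → b ≤ Dm p t r k) → b ≤ acc →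
    b ≤ rminAux p t r acc j cnt := by
  intro cnt
  induction cnt with
  | zero => intro j acc _ hacc; exact hacc
  | succ c ih =>
      intro j acc hk hacc
      exact ih (j + 1) _ (fun k h1 h2 => hk k (by omega) (by omega))
        (le_min hacc (hk j (le_refl _) (by omega)))
theorem rmin_le (p t : List Char) (r k : Nat) (hk : k ≤ t.length) : rmin p t r ≤ Dm p t r k := by
  unfold rmin
  rcases Nat.eq_zero_or_pos k with rfl | hpos
  · calc rminAux p t r (Dm p t r 0) 1 t.length ≤ Dm p t r 0 := rminAux_le_acc p t r _ _ _
      _ = _ := rfl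
  · exact rminAux_le_elem p t r t.length 1 _ k hpos (by omega)
theorem rmin_mono (p t : List Char) (r : Nat) : rmin p t r ≤ rmin p t (r + 1) := by
  have key : ∀ k : Nat, k ≤ t.length → rmin p t r ≤ Dm p t (r + 1) k := by
    intro k
    induction k with
    | zero =>
        intro _
        have h1 : rmin p t r ≤ Dm p t r 0 := rmin_le p t r 0 (by omega)
        rw [Dm_row_zero] at h1
        rw [Dm_row_zero]
        omega
    | succ k ih =>
        intro hk
        have h1 : rmin p t r ≤ Dm p t (r + 1) k := ih (by omega)
        have h2 : rmin p t r ≤ Dm p t r (k + 1) := rmin_le p t r (k + 1) hk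
        have h3 : rmin p t r ≤ Dm p t r k := rmin_le p t r k (by omega)
        have h4 := dcost_nonneg p t r k
        show rmin p t r ≤ Dm p t (r + 1) (k + 1)
        simp only [Dm]
        rw [le_min_iff, le_min_iff]
        refine ⟨⟨by omega, by omega⟩, by omega⟩
  unfold rmin
  exact rminAux_lb p t (r + 1) (rmin p t r) t.length 1 _
    (fun k h1 h2 => key k (by omega)) (by rw [Dm_row_zero]; have := key 0 (by omega); rwa [Dm_row_zero] at this)
theorem rmin_mono_le (p t : List Char) (r1 r2 : Nat) (h : r1 ≤ r2) : rmin p t r1 ≤ rmin p t r2 := by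
  induction r2 with
  | zero => simp_all
  | succ n ih =>
      rcases Nat.eq_or_lt_of_le h with rfl | hlt
      · exact le_refl _
      · exact le_trans (ih (by omega)) (rmin_mono p t n)
theorem rowSeg_zero (p t : List Char) : ∀ (cnt j : Nat), rowSeg p t 0 j cnt = List.replicate cnt (0 : Int) := by
  intro cnt
  induction cnt with
  | zero => intro j; rfl
  | succ c ih => intro j; simp [rowSeg, Dm, ih, List.replicate]
theorem aInner_spec (p t : List Char) :
    ∀ (ts : List Char) (j : Nat) (acc : Int) (r : Nat), t.drop j = ts →
    aInner (p.getD r ' ') (Dm p t (r + 1) j) acc (rowSeg p t r j (ts.length + 1)) ts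
      = (rowSeg p t (r + 1) (j + 1) ts.length, rminAux p t (r + 1) acc (j + 1) ts.length) := by
  intro ts
  induction ts with
  | nil => intro j acc r h; rfl
  | cons tc trest ih =>
      intro j acc r h
      have htc : t.getD j ' ' = tc := getD_of_drop t j ' ' tc trest h
      have hdrop : t.drop (j + 1) = trest := drop_succ_of_drop t j tc trest h
      have hcost : (if p.getD r ' ' ≠ tc then (1:Int) else 0) = dcost p t r j := by
        rw [← htc]; unfold dcost; rcases eq_or_ne (p.getD r ' ') (t.getD j ' ') with hc | hc
        · rw [if_neg (not_not_intro hc), if_pos hc]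
        · rw [if_pos hc, if_neg hc]
      simp only [List.length_cons, rowSeg, aInner]
      rw [hcost]
      rw [if_lt_eq_min (Dm p t (r + 1) j + 1) (Dm p t r (j + 1) + 1)]
      rw [if_lt_eq_min' (Dm p t r j + dcost p t r j)]
      have hD : min (min (Dm p t (r + 1) j + 1) (Dm p t r (j + 1) + 1)) (Dm p t r j + dcost p t r j)
          = Dm p t (r + 1) (j + 1) := by simp [Dm]
      rw [hD]
      rw [if_lt_eq_min' (Dm p t (r + 1) (j + 1)) acc]
      have ih' := ih (j + 1) (min acc (Dm p t (r + 1) (j + 1))) r hdrop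
      simp only [rowSeg] at ih'
      rw [ih']
      simp [rminAux]
theorem aRows_spec (p t : List Char) (cutoff : Int) :
    ∀ (ps : List Char) (r : Nat), p.drop r = ps → r + ps.length = p.length →
    aRows t cutoff (rowSeg p t r 0 (t.length + 1)) ((r : Int) + 1) ps
      = if rmin p t p.length ≤ cutoff then rmin p t p.length else cutoff + 1 := by
  intro ps
  induction ps with
  | nil =>
      intro r h hlen
      have hr : r = p.length := by simpa using hlen
      subst hr
      simp only [aRows, rowSeg]
      rw [PySem.List.min?_id_cons]
      rw [rowSeg_foldl_min]
      rfl
  | cons pc rest ih =>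
      intro r h hlen
      have hpc : p.getD r ' ' = pc := getD_of_drop p r ' ' pc rest h
      have hdrop : p.drop (r + 1) = rest := drop_succ_of_drop p r pc rest h
      simp only [aRows]
      have hin := aInner_spec p t t 0 ((r : Int) + 1) r (by simp)
      rw [Dm_row_zero] at hin
      push_cast at hin
      rw [hpc] at hin
      rw [hin]
      have hmin2 : rminAux p t (r + 1) ((r : Int) + 1) 1 t.length = rmin p t (r + 1) := by
        unfold rmin; rw [Dm_row_zero]; push_cast; rfl
      simp only [hmin2]
      have hrow : ((r : Int) + 1) :: rowSeg p t (r + 1) 1 t.length = rowSeg p t (r + 1) 0 (t.length + 1) := by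
        simp [rowSeg, Dm_row_zero]
      by_cases hcut : rmin p t (r + 1) > cutoff
      · rw [if_pos hcut]
        have : rmin p t (r + 1) ≤ rmin p t p.length :=
          rmin_mono_le p t (r + 1) p.length (by simp at hlen; omega)
        rw [if_neg (by omega)]
      · rw [if_neg hcut]
        rw [hrow]
        have ihr := ih (r + 1) hdrop (by simp at hlen ⊢; omega)
        push_cast at ihr
        exact ihr
theorem bStep_spec (p t : List Char) (j : Nat) :
    ∀ (ps : List Char) (i : Nat), p.drop i = ps →
    bStep (t.getD j ' ') (Dm p t i (j + 1)) (colSeg p t j i (ps.length + 1)) ps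
      = colSeg p t (j + 1) (i + 1) ps.length := by
  intro ps
  induction ps with
  | nil => intro i h; rfl
  | cons pc ps' ih =>
      intro i h
      have hpc : p.getD i ' ' = pc := getD_of_drop p i ' ' pc ps' h
      have hdrop : p.drop (i + 1) = ps' := drop_succ_of_drop p i pc ps' h
      have hcost : (if pc ≠ t.getD j ' ' then (1:Int) else 0) = dcost p t i j := by
        rw [← hpc]; unfold dcost
        rcases eq_or_ne (p.getD i ' ') (t.getD j ' ') with hc | hc
        · rw [if_neg (not_not_intro hc), if_pos hc]
        · rw [if_pos hc, if_neg hc]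
      simp only [List.length_cons, colSeg, bStep]
      rw [hcost]
      have hD : min (min (Dm p t i (j + 1) + 1) (Dm p t (i + 1) j + 1)) (Dm p t i j + dcost p t i j)
          = Dm p t (i + 1) (j + 1) := by
        simp only [Dm]; rw [min_comm (Dm p t i (j + 1) + 1) (Dm p t (i + 1) j + 1)]
      rw [hD]
      have ih' := ih (i + 1) hdrop
      simp only [colSeg] at ih'
      rw [ih']
theorem colSeg_getLastD (p t : List Char) (j : Nat) :
    ∀ (cnt i : Nat), (colSeg p t j i (cnt + 1)).getLastD 0 = Dm p t (i + cnt) j := by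
  intro cnt
  induction cnt with
  | zero => intro i; rfl
  | succ c ihc =>
      intro i
      have := ihc (i + 1)
      simp only [colSeg, List.getLastD_cons] at this ⊢
      rw [this]
      congr 1
      omega
theorem bLoop_spec (p t : List Char) :
    ∀ (ts : List Char) (j : Nat) (best : Int), t.drop j = ts →
    bLoop p (colSeg p t j 0 (p.length + 1)) best ts
      = rminAux p t p.length best (j + 1) ts.length := by
  intro ts
  induction ts with
  | nil => intro j best h; rfl
  | cons tc trest ih =>
      intro j best h
      have htc : t.getD j ' ' = tc := getD_of_drop t j ' ' tc trest h
      have hdrop : t.drop (j + 1) = trest := drop_succ_of_drop t j tc trest h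
      simp only [List.length_cons, bLoop]
      have hstep := bStep_spec p t j p 0 (by simp)
      rw [htc] at hstep
      have h0 : Dm p t 0 (j + 1) = 0 := by simp [Dm]
      rw [h0] at hstep
      rw [hstep]
      have hnew : (0 : Int) :: colSeg p t (j + 1) 1 p.length = colSeg p t (j + 1) 0 (p.length + 1) := by
        simp [colSeg, Dm]
      rw [hnew]
      rw [colSeg_getLastD p t (j + 1) p.length 0]
      rw [if_lt_eq_min' (Dm p t (0 + p.length) (j + 1)) best]
      rw [ih (j + 1) _ hdrop]
      simp [rminAux]
theorem colSeg_zero (p t : List Char) :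
    ∀ (cnt i : Nat), colSeg p t 0 i cnt = (List.range' i cnt).map (fun k => (k : Int)) := by
  intro cnt
  induction cnt with
  | zero => intro i; rfl
  | succ c ihc =>
      intro i
      simp [colSeg, List.range'_succ, ihc, Dm_row_zero]
theorem main_eq (pattern text : String) (cutoff : Int) :
    sub_levenshtein_distance pattern text cutoff = sub_levenshtein_distance_alt pattern text cutoff := by
  unfold sub_levenshtein_distance sub_levenshtein_distance_alt
  by_cases h1 : cutoff < 0
  · simp [h1]
  · simp only [if_neg h1]
    by_cases h2 : pattern = ""
    · simp [h2]
    · simp only [if_neg h2]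
      have hcol : (List.range (pattern.toList.length + 1)).map (fun i => (i : Int))
          = colSeg pattern.toList text.toList 0 0 (pattern.toList.length + 1) := by
        rw [colSeg_zero, List.range_eq_range']
      have hbest : bLoop pattern.toList
          (colSeg pattern.toList text.toList 0 0 (pattern.toList.length + 1))
          (pattern.toList.length : Int) text.toList
          = rmin pattern.toList text.toList pattern.toList.length := by
        have hb := bLoop_spec pattern.toList text.toList text.toList 0
          (pattern.toList.length : Int) (by simp)
        rw [hb]
        unfold rmin
        rw [Dm_row_zero]
      rw [hcol, hbest]
      have hlb : (pattern.toList.length : Int) - (text.toList.length : Int)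
          ≤ rmin pattern.toList text.toList pattern.toList.length := by
        unfold rmin
        apply rminAux_lb
        · intro k hk1 hk2
          have hd := Dm_ge pattern.toList text.toList pattern.toList.length k
          have hkn : (k : Int) ≤ (text.toList.length : Int) := by exact_mod_cast (by omega : k ≤ text.toList.length)
          omega
        · rw [Dm_row_zero]; omega
      by_cases h3 : (pattern.toList.length : Int) - (text.toList.length : Int) > cutoff
      · simp only [if_pos h3]
        rw [if_neg (by omega)]
      · simp only [if_neg h3]
        have hrep : List.replicate (text.toList.length + 1) (0 : Int)
            = rowSeg pattern.toList text.toList 0 0 (text.toList.length + 1) :=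
          (rowSeg_zero pattern.toList text.toList _ 0).symm
        rw [hrep]
        have hA := aRows_spec pattern.toList text.toList cutoff pattern.toList 0 (by simp) (by simp)
        simp only [Nat.cast_zero, zero_add] at hA
        rw [hA]

-- ===== VERDICT (by name: the statement is the Claim_ definition above) =====
theorem sub_levenshtein_distance_spec : Claim_equal_sub_levenshtein_distance := by
  intro pattern text cutoff _
  unfold Spec_sub_levenshtein_distance
  exact main_eq pattern text cutoff
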